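-- pv_equiv track=rewrite | github.com/gbouzioto/hackerrank | Hackerrank-30-days-of-code/day_26_nested_logic.py | fine
-- ===== SOURCE A (Python) =====
-- def fine(actual_d, due_d):
--     counter = 0
--     delay = [0, 0, 0]
--     for pos in range(3):
--         if actual_d[pos] <= due_d[pos]:
--             counter += 1
--         elif actual_d[pos] > due_d[pos] and actual_d[2] >= due_d[2]:
--             delay[pos] = actual_d[pos] - due_d[pos]
--     if counter == 3:
--         return 0
--     else:
--         if delay[1] == 0 and delay[2] == 0:
--             fee = 15 * delay[0]
--         elif delay[2] == 0:
--             fee = 500 * delay[1]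
--         else:
--             fee = 10000
--         return fee
-- ===== SOURCE B (Python) =====
-- def fine(actual_d, due_d):
--     # cascading comparison, most significant field first
--     if actual_d[2] > due_d[2]:
--         return 10000
--     if actual_d[2] < due_d[2]:
--         return 0
--     if actual_d[1] > due_d[1]:
--         return 500 * (actual_d[1] - due_d[1])
--     if actual_d[0] > due_d[0]:
--         return 15 * (actual_d[0] - due_d[0])
--     return 0
-- ===== Notes on version B (the rewrite author's own statement) =====
-- stated objective: simpler
-- what changed: Replaced the loop building a counter and a delay array with a direct early-return cascade comparing year, then month, then day (keeping A's behaviour of charging 15*day-delta even when the month is earlier than due).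
import Mathlib
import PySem

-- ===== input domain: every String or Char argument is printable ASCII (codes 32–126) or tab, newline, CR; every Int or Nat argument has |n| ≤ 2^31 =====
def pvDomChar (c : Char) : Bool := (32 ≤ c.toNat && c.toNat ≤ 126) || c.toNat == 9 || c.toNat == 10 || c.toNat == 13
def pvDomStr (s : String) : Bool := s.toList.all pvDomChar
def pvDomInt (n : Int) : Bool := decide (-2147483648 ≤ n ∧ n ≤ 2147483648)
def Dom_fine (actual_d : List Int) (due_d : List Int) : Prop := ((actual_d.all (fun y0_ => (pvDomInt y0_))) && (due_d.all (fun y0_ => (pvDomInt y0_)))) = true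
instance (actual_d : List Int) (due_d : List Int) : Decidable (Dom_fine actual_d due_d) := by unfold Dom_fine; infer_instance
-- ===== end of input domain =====

-- B replaces A's loop/counter/delay-array with a direct early-return cascade (year, month, day); return value only, no mutation observable.

-- ===== PORT A =====
-- literal port of A: loop over range(3) accumulating counter and the delay array, then the fee branches
def fine (actual_d : List Int) (due_d : List Int) : Int :=
  let st := (PySem.List.pyRange 0 3 1).foldl
    (fun (st : Int × List Int) (pos : Int) =>
      let a := (PySem.List.pyGet? actual_d pos).getD 0    -- actual_d[pos]; Pre_ keeps it in range
      let d := (PySem.List.pyGet? due_d pos).getD 0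
      let a2 := (PySem.List.pyGet? actual_d 2).getD 0
      let d2 := (PySem.List.pyGet? due_d 2).getD 0
      if a ≤ d then (st.1 + 1, st.2)
      else if a > d ∧ a2 ≥ d2 then (st.1, st.2.set pos.toNat (a - d))
      else st)
    (0, [0, 0, 0])
  if st.1 = 3 then 0
  else
    if PySem.List.pyGetD st.2 1 0 = 0 ∧ PySem.List.pyGetD st.2 2 0 = 0 then
      15 * PySem.List.pyGetD st.2 0 0
    else if PySem.List.pyGetD st.2 2 0 = 0 then
      500 * PySem.List.pyGetD st.2 1 0
    else 10000

-- ===== PORT B =====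
def fine_alt (actual_d : List Int) (due_d : List Int) : Int :=
  let a2 := (PySem.List.pyGet? actual_d 2).getD 0
  let d2 := (PySem.List.pyGet? due_d 2).getD 0
  if a2 > d2 then 10000
  else if a2 < d2 then 0
  else
    let a1 := (PySem.List.pyGet? actual_d 1).getD 0
    let d1 := (PySem.List.pyGet? due_d 1).getD 0
    if a1 > d1 then 500 * (a1 - d1)
    else
      let a0 := (PySem.List.pyGet? actual_d 0).getD 0
      let d0 := (PySem.List.pyGet? due_d 0).getD 0
      if a0 > d0 then 15 * (a0 - d0) else 0

-- ===== PRECONDITION & SPEC =====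
-- Pre_: both date triples must have at least 3 entries, else Python's indexing raises IndexError
def Pre_fine (actual_d : List Int) (due_d : List Int) : Prop :=
  3 ≤ actual_d.length ∧ 3 ≤ due_d.length
instance (actual_d : List Int) (due_d : List Int) : Decidable (Pre_fine actual_d due_d) := by unfold Pre_fine; infer_instance
def pvWitness_fine : List Int × List Int := ([5, 6, 2024], [3, 6, 2024])
def Spec_fine (actual_d : List Int) (due_d : List Int) (out : Int) : Prop := out = fine_alt actual_d due_d
instance (actual_d : List Int) (due_d : List Int) (out : Int) : Decidable (Spec_fine actual_d due_d out) := by unfold Spec_fine; infer_instance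

-- ===== CLAIM (what is proved, stated in full; the proofs are below) =====
def Claim_equal_fine : Prop := ∀ (actual_d : List Int) (due_d : List Int), Dom_fine actual_d due_d → Pre_fine actual_d due_d → Spec_fine actual_d due_d (fine actual_d due_d)

-- ===== LEMMAS AND PROOFS =====

-- ===== VERDICT (by name: the statement is the Claim_ definition above) =====
set_option maxHeartbeats 1000000 in
theorem fine_spec : Claim_equal_fine := by
  intro actual_d due_d hdom hpre
  obtain ⟨ha, hd⟩ := hpre
  match actual_d, due_d with
  | a0 :: a1 :: a2 :: ar, d0 :: d1 :: d2 :: dr =>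
    have hr : PySem.List.pyRange 0 3 1 = [0, 1, 2] := by decide
    have h2a : (2 : Int) ≤ ↑ar.length + 1 + 1 := by omega
    have h2d : (2 : Int) ≤ ↑dr.length + 1 + 1 := by omega
    have h0a : (0 : Int) ≤ ↑ar.length + 1 + 1 := by omega
    have h0d : (0 : Int) ≤ ↑dr.length + 1 + 1 := by omega
    have h1a : (0 : Int) ≤ ↑ar.length + 1 := by omega
    have h1d : (0 : Int) ≤ ↑dr.length + 1 := by omega
    have ea0 : PySem.List.pyGet? (a0 :: a1 :: a2 :: ar) 0 = some a0 := by
      simp [PySem.List.pyGet?, PySem.List.pyIdx?, h0a]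
    have ed0 : PySem.List.pyGet? (d0 :: d1 :: d2 :: dr) 0 = some d0 := by
      simp [PySem.List.pyGet?, PySem.List.pyIdx?, h0d]
    have ea1 : PySem.List.pyGet? (a0 :: a1 :: a2 :: ar) 1 = some a1 := by
      simp [PySem.List.pyGet?, PySem.List.pyIdx?, h1a]
    have ed1 : PySem.List.pyGet? (d0 :: d1 :: d2 :: dr) 1 = some d1 := by
      simp [PySem.List.pyGet?, PySem.List.pyIdx?, h1d]
    have ea2 : PySem.List.pyGet? (a0 :: a1 :: a2 :: ar) 2 = some a2 := by
      simp [PySem.List.pyGet?, PySem.List.pyIdx?, h2a]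
    have ed2 : PySem.List.pyGet? (d0 :: d1 :: d2 :: dr) 2 = some d2 := by
      simp [PySem.List.pyGet?, PySem.List.pyIdx?, h2d]
    by_cases H1 : a0 ≤ d0 <;> by_cases H2 : a1 ≤ d1 <;> by_cases H3 : a2 ≤ d2 <;>
      by_cases H4 : d2 ≤ a2 <;>
      simp only [Spec_fine, fine, fine_alt, hr, List.foldl, ea0, ed0, ea1, ed1, ea2, ed2,
        Option.getD_some, H1, H2, H3, H4, gt_iff_lt, ge_iff_le, if_true, if_false,
        ite_true, ite_false, and_true, and_false, true_and, false_and, not_true, not_false_iff] <;>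
      clear hdom ha hd hr h2a h2d h0a h0d h1a h1d ea0 ed0 ea1 ed1 ea2 ed2 <;>
      (try split_ifs) <;>
      (try simp_all [PySem.List.pyGetD, PySem.List.pyGet?, PySem.List.pyIdx?]) <;>
      omega
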